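-- pv_equiv track=rewrite | github.com/lihaonan0716/MCPHunt | src/mcphunt/trace_viewer.py | _find_trace
-- ===== SOURCE A (Python) =====
-- from typing import Any, Dict, List, Optional
--
-- def _find_trace(traces: List[Dict], trace_id: str = "",
--                 task_id: str = "", env_type: str = "") -> Optional[Dict]:
--     for t in traces:
--         if trace_id and t.get("trace_id", "") == trace_id:
--             return t
--         if task_id and env_type:
--             if t.get("task_id") == task_id and t.get("env_type") == env_type:
--                 return t
--     if trace_id:
--         for t in traces:
--             if trace_id in t.get("trace_id", ""):
--                 return t
--     return None
-- ===== SOURCE B (Python) =====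
-- from typing import Any, Dict, List, Optional
--
-- def _find_trace(traces: List[Dict], trace_id: str = "",
--                 task_id: str = "", env_type: str = "") -> Optional[Dict]:
--     # Rank every trace once (0 = exact/pair match, 1 = substring match, 2 = no match),
--     # then pick the lexicographic minimum of (rank, position): priority selection
--     # instead of A's two sequential scans.
--     def rank(t):
--         if trace_id and t.get("trace_id", "") == trace_id:
--             return 0
--         if task_id and env_type and t.get("task_id") == task_id and t.get("env_type") == env_type:
--             return 0
--         if trace_id and trace_id in t.get("trace_id", ""):
--             return 1
--         return 2
--     matched = [(r, i, t) for i, t in enumerate(traces) if (r := rank(t)) < 2]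
--     return min(matched)[2] if matched else None
-- ===== Notes on version B (the rewrite author's own statement) =====
-- stated objective: alternative
-- what changed: Replaces A's two sequential scans (exact/pair pass, then substring pass) by a priority selection: each trace is ranked once (0 = exact/pair match, 1 = substring match, 2 = no match) and the lexicographic minimum of (rank, position) is returned.
import Mathlib
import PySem

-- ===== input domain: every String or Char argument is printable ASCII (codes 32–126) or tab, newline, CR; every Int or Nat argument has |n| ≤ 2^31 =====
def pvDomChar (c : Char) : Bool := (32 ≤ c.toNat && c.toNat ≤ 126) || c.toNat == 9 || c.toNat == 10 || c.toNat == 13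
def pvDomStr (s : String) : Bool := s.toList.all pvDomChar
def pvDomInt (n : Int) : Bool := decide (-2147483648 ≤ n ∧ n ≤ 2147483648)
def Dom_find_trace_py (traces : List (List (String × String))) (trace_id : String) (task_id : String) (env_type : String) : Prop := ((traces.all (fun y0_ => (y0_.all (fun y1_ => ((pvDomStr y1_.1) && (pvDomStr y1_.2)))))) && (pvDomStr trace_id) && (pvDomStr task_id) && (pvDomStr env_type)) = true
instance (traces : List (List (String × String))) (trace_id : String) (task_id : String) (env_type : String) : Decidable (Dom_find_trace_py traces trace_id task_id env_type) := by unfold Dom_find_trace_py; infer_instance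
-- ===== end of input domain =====

-- B replaces A's two sequential scans by priority selection: rank each trace once
-- (0 = exact/pair, 1 = substring, 2 = none) and return the min of (rank, position);
-- objective: alternative algorithm, same O(n) cost.

-- ===== PORT A =====
-- first loop of A: exact trace_id match, or task_id/env_type pair match
def ftLoop1 (trace_id task_id env_type : String) : List (List (String × String)) → Option (List (String × String))
  | [] => none
  | t :: ts =>
    if trace_id ≠ "" ∧ (PySem.Dict.mk t).getD "trace_id" "" = trace_id then some t
    else if task_id ≠ "" ∧ env_type ≠ "" ∧
        (PySem.Dict.mk t).get? "task_id" = some task_id ∧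
        (PySem.Dict.mk t).get? "env_type" = some env_type then some t
    else ftLoop1 trace_id task_id env_type ts

-- second loop of A: substring match on trace_id
def ftLoop2 (trace_id : String) : List (List (String × String)) → Option (List (String × String))
  | [] => none
  | t :: ts =>
    if PySem.Str.isIn trace_id ((PySem.Dict.mk t).getD "trace_id" "") then some t
    else ftLoop2 trace_id ts

def find_trace_py (traces : List (List (String × String))) (trace_id : String) (task_id : String) (env_type : String) : Option (List (String × String)) :=
  match ftLoop1 trace_id task_id env_type traces with
  | some t => some t
  | none => if trace_id ≠ "" then ftLoop2 trace_id traces else none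

-- ===== PORT B =====
-- Source B's rank: 0 = exact/pair match, 1 = substring match, 2 = no match
def ftRank (trace_id task_id env_type : String) (t : List (String × String)) : Nat :=
  if trace_id ≠ "" ∧ (PySem.Dict.mk t).getD "trace_id" "" = trace_id then 0
  else if task_id ≠ "" ∧ env_type ≠ "" ∧
      (PySem.Dict.mk t).get? "task_id" = some task_id ∧
      (PySem.Dict.mk t).get? "env_type" = some env_type then 0
  else if trace_id ≠ "" ∧ PySem.Str.isIn trace_id ((PySem.Dict.mk t).getD "trace_id" "") then 1
  else 2

-- Python's tuple-min on (rank, index, trace); the trace component is never compared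
-- because the enumerate indices are pairwise distinct
def ftMinStep (b y : Nat × Int × List (String × String)) : Nat × Int × List (String × String) :=
  if y.1 < b.1 ∨ (y.1 = b.1 ∧ y.2.1 < b.2.1) then y else b

def find_trace_py_alt (traces : List (List (String × String))) (trace_id : String) (task_id : String) (env_type : String) : Option (List (String × String)) :=
  let matched := ((PySem.List.enumerate traces).map
      (fun p => (ftRank trace_id task_id env_type p.2, p.1, p.2))).filter (fun x => x.1 < 2)
  match matched with
  | [] => none
  | x :: xs => some ((xs.foldl ftMinStep x).2.2)

-- ===== PRECONDITION & SPEC =====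
def Spec_find_trace_py (traces : List (List (String × String))) (trace_id : String) (task_id : String) (env_type : String) (out : Option (List (String × String))) : Prop := out = find_trace_py_alt traces trace_id task_id env_type
instance (traces : List (List (String × String))) (trace_id : String) (task_id : String) (env_type : String) (out : Option (List (String × String))) : Decidable (Spec_find_trace_py traces trace_id task_id env_type out) := by unfold Spec_find_trace_py; infer_instance

-- ===== CLAIM (what is proved, stated in full; the proofs are below) =====
def Claim_equal_find_trace_py : Prop := ∀ (traces : List (List (String × String))) (trace_id : String) (task_id : String) (env_type : String), Dom_find_trace_py traces trace_id task_id env_type → Spec_find_trace_py traces trace_id task_id env_type (find_trace_py traces trace_id task_id env_type)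

-- ===== LEMMAS AND PROOFS =====

-- the matched list of B, generalized over the starting index of enumerate
def ftMatched (trace_id task_id env_type : String) (n : Int) (ts : List (List (String × String))) : List (Nat × Int × List (String × String)) :=
  ((PySem.List.enumerate ts n).map
      (fun p => (ftRank trace_id task_id env_type p.2, p.1, p.2))).filter (fun x => x.1 < 2)

theorem ftMatched_nil (tid task env : String) (n : Int) : ftMatched tid task env n [] = [] := by
  simp [ftMatched, PySem.List.enumerate_nil]

theorem ftMatched_cons (tid task env : String) (n : Int) (t : List (String × String)) (ts : List (List (String × String))) :
    ftMatched tid task env n (t :: ts) =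
      if ftRank tid task env t < 2 then (ftRank tid task env t, n, t) :: ftMatched tid task env (n + 1) ts
      else ftMatched tid task env (n + 1) ts := by
  simp only [ftMatched, PySem.List.enumerate_cons, List.map_cons, List.filter_cons]
  split_ifs with h <;> simp_all

theorem ftMatched_rank_le (tid task env : String) (n : Int) (ts : List (List (String × String))) :
    ∀ y ∈ ftMatched tid task env n ts, y.1 ≤ 1 := by
  intro y hy
  have := (List.mem_filter.mp hy).2
  simp at this
  omega

theorem ftMatched_pairwise (tid task env : String) (n : Int) (ts : List (List (String × String))) :
    (ftMatched tid task env n ts).Pairwise (fun u v => u.2.1 < v.2.1) := by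
  have h1 : (PySem.List.enumerate ts n).Pairwise (fun p q => p.1 < q.1) :=
    PySem.List.pairwise_lt_enumerate ts n
  have h2 := h1.map (f := fun p => (ftRank tid task env p.2, p.1, p.2))
    (S := fun u v => u.2.1 < v.2.1) (by intro a b hab; simpa using hab)
  exact h2.sublist List.filter_sublist

theorem ftFold_char (xs : List (Nat × Int × List (String × String))) :
    ∀ b, (∀ y ∈ b :: xs, y.1 ≤ 1) → (b :: xs).Pairwise (fun u v => u.2.1 < v.2.1) →
      xs.foldl ftMinStep b = if b.1 = 0 then b else ((xs.find? (fun y => y.1 == 0)).getD b) := by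
  induction xs with
  | nil => intro b _ _; simp
  | cons y xs ih =>
    intro b hle hpw
    have hby : b.2.1 < y.2.1 := (List.pairwise_cons.mp hpw).1 y (by simp)
    have hb1 : b.1 ≤ 1 := hle b (by simp)
    have hy1 : y.1 ≤ 1 := hle y (by simp)
    simp only [List.foldl_cons]
    by_cases hb : b.1 = 0
    · have hstep : ftMinStep b y = b := by
        unfold ftMinStep
        rw [if_neg]
        rintro (h | ⟨h1, h2⟩)
        · omega
        · omega
      rw [hstep, ih b]
      · simp [hb]
      · intro z hz
        rcases List.mem_cons.mp hz with h | h
        · exact h ▸ hb1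
        · exact hle z (by simp [h])
      · exact hpw.sublist (by
          refine List.cons_sublist_cons.mpr ?_
          exact List.sublist_cons_self y xs)
    · have hb1' : b.1 = 1 := by omega
      by_cases hy : y.1 = 0
      · have hstep : ftMinStep b y = y := by
          unfold ftMinStep
          rw [if_pos]; left; omega
        rw [hstep, ih y]
        · simp [hy, hb]
        · intro z hz
          rcases List.mem_cons.mp hz with h | h
          · exact h ▸ hy1
          · exact hle z (by simp [h])
        · exact (List.pairwise_cons.mp hpw).2
      · have hy1' : y.1 = 1 := by omega
        have hstep : ftMinStep b y = b := by
          unfold ftMinStep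
          rw [if_neg]
          rintro (h | ⟨h1, h2⟩)
          · omega
          · omega
        rw [hstep, ih b]
        · have : (y.1 == 0) = false := by simp [hy]
          simp [this]
        · intro z hz
          rcases List.mem_cons.mp hz with h | h
          · exact h ▸ hb1
          · exact hle z (by simp [h])
        · exact hpw.sublist (by
            refine List.cons_sublist_cons.mpr ?_
            exact List.sublist_cons_self y xs)

-- B in "first rank-0, else head of matched" form
theorem ftB_aux (tid task env : String) (n : Int) (ts : List (List (String × String))) :
    (match ftMatched tid task env n ts with
      | [] => (none : Option (List (String × String)))
      | x :: xs => some ((xs.foldl ftMinStep x).2.2)) =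
    (match (ftMatched tid task env n ts).find? (fun y => y.1 == 0) with
      | some y => some y.2.2
      | none => ((ftMatched tid task env n ts).head?).map (fun x => x.2.2)) := by
  cases hm : ftMatched tid task env n ts with
  | nil => simp
  | cons x xs =>
    dsimp only
    have hle : ∀ y ∈ x :: xs, y.1 ≤ 1 := by
      rw [← hm]; exact ftMatched_rank_le tid task env n ts
    have hpw : (x :: xs).Pairwise (fun u v => u.2.1 < v.2.1) := by
      rw [← hm]; exact ftMatched_pairwise tid task env n ts
    rw [ftFold_char xs x hle hpw]
    by_cases hx : x.1 = 0
    · simp [hx]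
    · have : (x.1 == 0) = false := by simp [hx]
      simp only [if_neg hx, List.find?_cons, this]
      cases hf : xs.find? (fun y => y.1 == 0) with
      | some y => simp
      | none => simp

theorem ftFind0_matched (tid task env : String) (ts : List (List (String × String))) :
    ∀ n : Int, ((ftMatched tid task env n ts).find? (fun y => y.1 == 0)).map (fun y => y.2.2) =
      ts.find? (fun t => ftRank tid task env t == 0) := by
  induction ts with
  | nil => intro n; simp [ftMatched_nil]
  | cons t ts ih =>
    intro n
    rw [ftMatched_cons]
    by_cases h2 : ftRank tid task env t < 2
    · rw [if_pos h2]
      by_cases h0 : ftRank tid task env t = 0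
      · simp [h0]
      · have hb : (ftRank tid task env t == 0) = false := by simp [h0]
        simp only [List.find?_cons, hb]
        exact ih (n + 1)
    · have h0 : ftRank tid task env t ≠ 0 := by omega
      have hb : (ftRank tid task env t == 0) = false := by simp [h0]
      rw [if_neg h2]
      simp only [List.find?_cons, hb]
      exact ih (n + 1)

theorem ftHead_matched (tid task env : String) (ts : List (List (String × String))) :
    ∀ n : Int, (∀ t ∈ ts, ftRank tid task env t ≠ 0) →
      ((ftMatched tid task env n ts).head?).map (fun x => x.2.2) =
        ts.find? (fun t => ftRank tid task env t == 1) := by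
  induction ts with
  | nil => intro n _; simp [ftMatched_nil]
  | cons t ts ih =>
    intro n h0
    have ht0 : ftRank tid task env t ≠ 0 := h0 t (by simp)
    rw [ftMatched_cons]
    by_cases h1 : ftRank tid task env t = 1
    · simp [h1]
    · have h2 : ¬ ftRank tid task env t < 2 := by
        have : ftRank tid task env t = 0 ∨ ftRank tid task env t = 1 ∨ ftRank tid task env t = 2 := by
          unfold ftRank; split_ifs <;> simp
        omega
      have hb : (ftRank tid task env t == 1) = false := by simp [h1]
      rw [if_neg h2]
      simp only [List.find?_cons, hb]
      exact ih (n + 1) (fun u hu => h0 u (by simp [hu]))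

-- B's characterization
theorem ftB_char (tid task env : String) (ts : List (List (String × String))) :
    find_trace_py_alt ts tid task env =
      match ts.find? (fun t => ftRank tid task env t == 0) with
      | some t => some t
      | none => ts.find? (fun t => ftRank tid task env t == 1) := by
  have hdef : find_trace_py_alt ts tid task env =
      (match ftMatched tid task env 0 ts with
        | [] => (none : Option (List (String × String)))
        | x :: xs => some ((xs.foldl ftMinStep x).2.2)) := by
    simp only [find_trace_py_alt, ftMatched]
  rw [hdef, ftB_aux]
  cases hf : (ftMatched tid task env 0 ts).find? (fun y => y.1 == 0) with
  | some y =>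
    have := ftFind0_matched tid task env ts 0
    rw [hf] at this
    simp only [Option.map_some] at this
    rw [← this]
  | none =>
    have h := ftFind0_matched tid task env ts 0
    rw [hf] at h
    simp only [Option.map_none] at h
    rw [← h]
    have h0 : ∀ t ∈ ts, ftRank tid task env t ≠ 0 := by
      intro t ht hc
      have := List.find?_eq_none.mp h.symm t ht
      simp [hc] at this
    rw [ftHead_matched tid task env ts 0 h0]

-- A's first loop finds the first rank-0 trace
theorem ftLoop1_char (tid task env : String) (ts : List (List (String × String))) :
    ftLoop1 tid task env ts = ts.find? (fun t => ftRank tid task env t == 0) := by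
  induction ts with
  | nil => rfl
  | cons t ts ih =>
    by_cases h1 : tid ≠ "" ∧ (PySem.Dict.mk t).getD "trace_id" "" = tid
    · simp [ftLoop1, ftRank, h1]
    · by_cases h2 : task ≠ "" ∧ env ≠ "" ∧
          (PySem.Dict.mk t).get? "task_id" = some task ∧
          (PySem.Dict.mk t).get? "env_type" = some env
      · simp [ftLoop1, ftRank, h1, h2]
      · have hr : ftRank tid task env t ≠ 0 := by
          unfold ftRank
          rw [if_neg h1, if_neg h2]
          split_ifs <;> simp
        have hb : (ftRank tid task env t == 0) = false := by simp [hr]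
        simp only [ftLoop1, if_neg h1, if_neg h2, List.find?_cons, hb]
        exact ih

-- A's second loop, under "no rank-0 trace", finds the first rank-1 trace
theorem ftLoop2_char (tid task env : String) (ts : List (List (String × String)))
    (htid : tid ≠ "") (h0 : ∀ t ∈ ts, ftRank tid task env t ≠ 0) :
    ftLoop2 tid ts = ts.find? (fun t => ftRank tid task env t == 1) := by
  induction ts with
  | nil => rfl
  | cons t ts ih =>
    have ht0 : ftRank tid task env t ≠ 0 := h0 t (by simp)
    have hc1 : ¬ (tid ≠ "" ∧ (PySem.Dict.mk t).getD "trace_id" "" = tid) := by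
      intro hc; exact ht0 (by simp [ftRank, hc])
    have hc2 : ¬ (task ≠ "" ∧ env ≠ "" ∧
        (PySem.Dict.mk t).get? "task_id" = some task ∧
        (PySem.Dict.mk t).get? "env_type" = some env) := by
      intro hc
      apply ht0
      unfold ftRank
      rw [if_neg hc1, if_pos hc]
    by_cases hs : PySem.Str.isIn tid ((PySem.Dict.mk t).getD "trace_id" "") = true
    · have hr : ftRank tid task env t = 1 := by
        unfold ftRank
        rw [if_neg hc1, if_neg hc2, if_pos ⟨htid, hs⟩]
      have hb : (ftRank tid task env t == 1) = true := by simp [hr]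
      simp only [ftLoop2, List.find?_cons, hb]
      rw [if_pos hs]
    · have hr : ftRank tid task env t ≠ 1 := by
        unfold ftRank
        rw [if_neg hc1, if_neg hc2]
        split_ifs with h
        · exact absurd h.2 hs
        · simp
      have hb : (ftRank tid task env t == 1) = false := by simp [hr]
      simp only [ftLoop2, List.find?_cons, hb]
      rw [if_neg hs]
      exact ih (fun u hu => h0 u (by simp [hu]))

-- ===== VERDICT (by name: the statement is the Claim_ definition above) =====
theorem find_trace_py_spec : Claim_equal_find_trace_py := by
  intro traces tid task env _
  unfold Spec_find_trace_py find_trace_py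
  rw [ftLoop1_char, ftB_char]
  cases hf : traces.find? (fun t => ftRank tid task env t == 0) with
  | some t => simp
  | none =>
    simp only
    have h0 : ∀ t ∈ traces, ftRank tid task env t ≠ 0 := by
      intro t ht hc
      have := List.find?_eq_none.mp hf t ht
      simp [hc] at this
    by_cases htid : tid ≠ ""
    · rw [if_pos htid, ftLoop2_char tid task env traces htid h0]
    · rw [if_neg htid]
      replace htid : tid = "" := by by_contra hc; exact htid hc
      symm
      rw [List.find?_eq_none]
      intro t ht
      have ht0 := h0 t ht
      have : ftRank tid task env t = 2 := by
        unfold ftRank at ht0 ⊢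
        split_ifs at ht0 ⊢ with a b c
        · exact absurd rfl ht0
        · exact absurd rfl ht0
        · exact absurd htid c.1
        · rfl
      simp [this]
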